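-- pv_equiv track=rewrite | github.com/behenate/ASD | Dynamic_Programming_and_Greedy_Algorithms/Homeworks/Bonus_Points_Homeworks/zad8_Euler.py | matrix_to_adj
-- ===== SOURCE A (Python) =====
-- def integrity_check(G):
--     def DFS_visit(G, i):
--         visited[i] = True
--         for neigh in G[i]:
--             if not visited[neigh]:
--                 DFS_visit(G, neigh)
--
--     n = len(G)
--     visited = [False for _ in range(n)]
--     visit_cnt = 0
--     for i in range(n):
--         if not visited[i]:
--             visit_cnt += 1
--             DFS_visit(G, i)
--     return visit_cnt <= 1
--
-- def matrix_to_adj(matrix):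
--     n = len(matrix)
--     adj_g = [[] for _ in range(n)]
--     can_do = True
--     for i in range(n):
--         for j in range(i, n):
--             if matrix[i][j]:
--                 adj_g[i].append(j)
--                 adj_g[j].append(i)
--     # Używając nowo powstałej listy sprawdź czy cykl Eulera istnieje
--     for i in range(n):
--         o = len(adj_g[i])
--         if o % 2 != 0:
--             can_do = False
--     # Sprawdź czy graf jest spójny. Niespójny graf nie może mieć cyklu eulera
--     can_do = can_do and integrity_check(adj_g)
--     return adj_g, can_do
-- ===== SOURCE B (Python) =====
-- def matrix_to_adj(matrix):
--     n = len(matrix)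
--     adj_g = [[] for _ in range(n)]
--     for i in range(n):
--         for j in range(i, n):
--             if matrix[i][j]:
--                 adj_g[i].append(j)
--                 adj_g[j].append(i)
--     # Euler cycle: every degree even, and the graph is connected (every vertex
--     # reachable from vertex 0) -- checked by an iterative explicit-stack DFS.
--     parity_ok = all(len(row) % 2 == 0 for row in adj_g)
--     if n == 0:
--         connected = True
--     else:
--         visited = [False] * n
--         stack = [0]
--         while stack:
--             x = stack.pop()
--             if not visited[x]:
--                 visited[x] = True
--                 stack.extend(reversed(adj_g[x]))
--         connected = all(visited)
--     return adj_g, parity_ok and connected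
-- ===== Notes on version B (the rewrite author's own statement) =====
-- stated objective: alternative
-- what changed: Connectivity is checked by an explicit-stack iterative DFS from vertex 0 followed by an all(visited) test, instead of A's recursive DFS that counts components over all start vertices; the degree-parity check becomes a single all(); the adjacency build is kept as is.
import Mathlib
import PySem

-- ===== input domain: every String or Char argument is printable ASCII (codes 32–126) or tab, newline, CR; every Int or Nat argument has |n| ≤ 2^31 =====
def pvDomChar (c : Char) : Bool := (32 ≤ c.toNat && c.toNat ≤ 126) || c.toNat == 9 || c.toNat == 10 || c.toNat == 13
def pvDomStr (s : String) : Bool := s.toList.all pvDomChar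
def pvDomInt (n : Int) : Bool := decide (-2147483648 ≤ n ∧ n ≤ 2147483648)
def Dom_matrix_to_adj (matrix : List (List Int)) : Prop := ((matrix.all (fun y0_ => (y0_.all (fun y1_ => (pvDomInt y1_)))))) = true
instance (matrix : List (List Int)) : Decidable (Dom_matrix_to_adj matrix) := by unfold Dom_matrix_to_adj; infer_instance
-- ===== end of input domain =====

-- B replaces A's recursive component-counting DFS by an explicit-stack DFS from
-- vertex 0 plus an all(visited) test (alternative decomposition, same cost);
-- the adjacency build is kept identical. Equality of the return value is proved
-- on Pre_ (A raises IndexError when some row is shorter than the matrix).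

-- ===== PORT A =====

-- matrix[i][j] for the build loops; exact inside Pre_ (there 0 ≤ i,j < row length)
def pvMGet (m : List (List Int)) (i j : Nat) : Int := (m.getD i []).getD j 0

-- adj_g[k].append(x)
def pvApp (g : List (List Int)) (k : Nat) (x : Int) : List (List Int) :=
  g.modify k (fun r => r ++ [x])

-- the shared build loops (both Pythons contain this code verbatim):
-- for i in range(n): for j in range(i, n): if matrix[i][j]: append j to row i, i to row j
def pvBuildAdj (matrix : List (List Int)) : List (List Int) :=
  let n := matrix.length
  (List.range n).foldl
    (fun g i =>
      (List.range' i (n - i)).foldl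
        (fun g j => if pvMGet matrix i j ≠ 0 then pvApp (pvApp g i (Int.ofNat j)) j (Int.ofNat i) else g)
        g)
    (List.replicate n [])

-- termination helpers for the DFS state: marking a fresh vertex lowers the number of `false`s
theorem pvCount_set_lt : ∀ (v : List Bool) (k : Nat), v[k]? = some false → (v.set k true).count false < v.count false := by
  intro v
  induction v with
  | nil => intro k h; simp at h
  | cons a t ih =>
    intro k h
    cases k with
    | zero => simp at h; subst h; simp
    | succ k =>
      simp at h
      have := ih k h
      simp only [List.set_cons_succ, List.count_cons]
      omega

theorem pvGet_norm {α : Type} (v : List α) (x : Int) (b : α) (h : PySem.List.pyGet? v x = some b) :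
    ∃ k, PySem.List.pyIdx? v.length x = some k ∧ v[k]? = some b := by
  simp only [PySem.List.pyGet?, Option.bind_eq_some_iff] at h
  obtain ⟨k, hk, hv⟩ := h
  exact ⟨k, hk, hv⟩

theorem pvSetD_norm {α : Type} (v : List α) (x : Int) (w : α) (k : Nat)
    (hk : PySem.List.pyIdx? v.length x = some k) :
    PySem.List.pySetD v x w = v.set k w := by
  simp [PySem.List.pySetD, PySem.List.pySet?, hk]

theorem pvCount_pySetD_lt (v : List Bool) (x : Int)
    (h : PySem.List.pyGet? v x = some false) :
    (PySem.List.pySetD v x true).count false < v.count false := by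
  obtain ⟨k, hk, hv⟩ := pvGet_norm v x false h
  rw [pvSetD_norm v x true k hk]
  exact pvCount_set_lt v k hv

mutual
-- DFS_visit(G, i): visited[i] = True; for neigh in G[i]: if not visited[neigh]: DFS_visit(G, neigh)
-- fuel only makes the recursion total; every call site passes fuel ≥ (number of unvisited
-- vertices), so the 0-fuel branch is never reached and the port is exact.
def pvDfsVisit (G : List (List Int)) (fuel : Nat) (v : List Bool) (i : Int) : List Bool :=
  match fuel with
  | 0 => v
  | f + 1 =>
    if PySem.List.pyGet? v i = some false then
      pvNeighLoop G f (PySem.List.pySetD v i true) (PySem.List.pyGetD G i [])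
    else v
termination_by (fuel, 0)

def pvNeighLoop (G : List (List Int)) (fuel : Nat) (v : List Bool) (ns : List Int) : List Bool :=
  match ns with
  | [] => v
  | x :: xs =>
    if PySem.List.pyGet? v x = some false then
      pvNeighLoop G fuel (pvDfsVisit G fuel v x) xs
    else pvNeighLoop G fuel v xs
termination_by (fuel, ns.length + 1)
end

-- one step of integrity_check's outer loop: if not visited[i]: visit_cnt += 1; DFS_visit(G, i)
def pvCntStep (G : List (List Int)) (n : Nat) (st : List Bool × Int) (i : Nat) : List Bool × Int :=
  if PySem.List.pyGet? st.1 (i : Int) = some false then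
    (pvDfsVisit G n st.1 (i : Int), st.2 + 1)
  else st

-- integrity_check(G): count DFS components, return visit_cnt <= 1
def pvIntegrity (G : List (List Int)) : Bool :=
  decide (((List.range G.length).foldl (pvCntStep G G.length)
      (List.replicate G.length false, 0)).2 ≤ 1)

def matrix_to_adj (matrix : List (List Int)) : List (List Int) × Bool :=
  let n := matrix.length
  let adj_g := pvBuildAdj matrix
  let can_do := (List.range n).foldl
    (fun can_do i => if PySem.Int.mod (PySem.List.len (adj_g.getD i [])) 2 ≠ 0 then false else can_do)
    true
  let can_do := can_do && pvIntegrity adj_g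
  (adj_g, can_do)

-- ===== PORT B =====

-- the while loop over the explicit stack; the Lean list keeps the TOP first (the reverse of
-- the Python list), so 'x = stack.pop()' is the head and 'stack.extend(reversed(adj_g[x]))'
-- prepends adj_g[x] — exact.
def pvStackLoop (G : List (List Int)) (v : List Bool) (stack : List Int) : List Bool :=
  match stack with
  | [] => v
  | x :: rest =>
    if h : PySem.List.pyGet? v x = some false then
      pvStackLoop G (PySem.List.pySetD v x true) (PySem.List.pyGetD G x [] ++ rest)
    else pvStackLoop G v rest
termination_by (v.count false, stack.length)
decreasing_by
  · exact Prod.Lex.left _ _ (pvCount_pySetD_lt v x h)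
  · exact Prod.Lex.right _ (by simp)

def matrix_to_adj_alt (matrix : List (List Int)) : List (List Int) × Bool :=
  let n := matrix.length
  let adj_g := pvBuildAdj matrix
  let parity_ok := adj_g.all (fun row => row.length % 2 == 0)
  let connected :=
    if n = 0 then true
    else (pvStackLoop adj_g (List.replicate n false) [(0 : Int)]).all (fun b => b)
  (adj_g, parity_ok && connected)

-- ===== PRECONDITION & SPEC =====
-- Pre_: exactly the inputs where Python A returns (it raises IndexError on matrix[i][j]
-- as soon as some row is shorter than the number of rows).
def Pre_matrix_to_adj (matrix : List (List Int)) : Prop :=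
  ∀ row ∈ matrix, matrix.length ≤ row.length
instance (matrix : List (List Int)) : Decidable (Pre_matrix_to_adj matrix) := by
  unfold Pre_matrix_to_adj; infer_instance

def pvWitness_matrix_to_adj : List (List Int) := [[0, 1], [1, 0]]

def Spec_matrix_to_adj (matrix : List (List Int)) (out : List (List Int) × Bool) : Prop := out = matrix_to_adj_alt matrix
instance (matrix : List (List Int)) (out : List (List Int) × Bool) : Decidable (Spec_matrix_to_adj matrix out) := by unfold Spec_matrix_to_adj; infer_instance

-- ===== CLAIM (what is proved, stated in full; the proofs are below) =====
def Claim_equal_matrix_to_adj : Prop := ∀ (matrix : List (List Int)), Dom_matrix_to_adj matrix → Pre_matrix_to_adj matrix → Spec_matrix_to_adj matrix (matrix_to_adj matrix)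

-- ===== LEMMAS AND PROOFS =====

-- pySetD preserves length and already-true entries
theorem pvSetD_length {α : Type} (v : List α) (x : Int) (w : α) :
    (PySem.List.pySetD v x w).length = v.length := by
  cases hk : PySem.List.pyIdx? v.length x with
  | none => simp [PySem.List.pySetD, PySem.List.pySet?, hk]
  | some k => rw [pvSetD_norm v x w k hk]; simp

theorem pvSetD_true_mono (v : List Bool) (x : Int) (k : Nat) (h : v[k]? = some true) :
    (PySem.List.pySetD v x true)[k]? = some true := by
  cases hk : PySem.List.pyIdx? v.length x with
  | none => simpa [PySem.List.pySetD, PySem.List.pySet?, hk] using h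
  | some j =>
    rw [pvSetD_norm v x true j hk]
    rw [List.getElem?_set]
    have hkl : k < v.length := by
      by_contra hlt
      rw [List.getElem?_eq_none (by omega)] at h
      simp at h
    split
    · next hj => subst hj; simp [hkl]
    · exact h

-- DFS preserves the length of `visited`
theorem pvLenBoth (fuel : Nat) :
    (∀ G v i, (pvDfsVisit G fuel v i).length = v.length) ∧
    (∀ G v ns, (pvNeighLoop G fuel v ns).length = v.length) := by
  induction fuel with
  | zero =>
    have hd : ∀ G v (i : Int), (pvDfsVisit G 0 v i).length = v.length := by
      intro G v i; simp [pvDfsVisit]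
    refine ⟨hd, ?_⟩
    intro G v ns
    induction ns generalizing v with
    | nil => simp [pvNeighLoop]
    | cons x xs ih =>
      rw [pvNeighLoop]
      split
      · rw [ih, hd]
      · exact ih v
  | succ f ihf =>
    have hd : ∀ G v (i : Int), (pvDfsVisit G (f+1) v i).length = v.length := by
      intro G v i
      rw [pvDfsVisit]
      split
      · rw [ihf.2, pvSetD_length]
      · rfl
    refine ⟨hd, ?_⟩
    intro G v ns
    induction ns generalizing v with
    | nil => simp [pvNeighLoop]
    | cons x xs ih =>
      rw [pvNeighLoop]
      split
      · rw [ih, hd]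
      · exact ih v

-- DFS never unmarks a visited vertex
theorem pvMonoBoth (fuel : Nat) :
    (∀ G v (i : Int) (k : Nat), v[k]? = some true → (pvDfsVisit G fuel v i)[k]? = some true) ∧
    (∀ G v ns (k : Nat), v[k]? = some true → (pvNeighLoop G fuel v ns)[k]? = some true) := by
  induction fuel with
  | zero =>
    have hd : ∀ G v (i : Int) (k : Nat), v[k]? = some true → (pvDfsVisit G 0 v i)[k]? = some true := by
      intro G v i k h; simpa [pvDfsVisit] using h
    refine ⟨hd, ?_⟩
    intro G v ns
    induction ns generalizing v with
    | nil => intro k h; simpa [pvNeighLoop] using h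
    | cons x xs ih =>
      intro k h
      rw [pvNeighLoop]
      split
      · exact ih _ k (hd _ _ _ k h)
      · exact ih v k h
  | succ f ihf =>
    have hd : ∀ G v (i : Int) (k : Nat), v[k]? = some true → (pvDfsVisit G (f+1) v i)[k]? = some true := by
      intro G v i k h
      rw [pvDfsVisit]
      split
      · exact ihf.2 _ _ _ k (pvSetD_true_mono v i k h)
      · exact h
    refine ⟨hd, ?_⟩
    intro G v ns
    induction ns generalizing v with
    | nil => intro k h; simpa [pvNeighLoop] using h
    | cons x xs ih =>
      intro k h
      rw [pvNeighLoop]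
      split
      · exact ih _ k (hd _ _ _ k h)
      · exact ih v k h

-- DFS only shrinks the number of unvisited vertices
theorem pvCountBoth (fuel : Nat) :
    (∀ G v (i : Int), (pvDfsVisit G fuel v i).count false ≤ v.count false) ∧
    (∀ G v ns, (pvNeighLoop G fuel v ns).count false ≤ v.count false) := by
  induction fuel with
  | zero =>
    have hd : ∀ G v (i : Int), (pvDfsVisit G 0 v i).count false ≤ v.count false := by
      intro G v i; simp [pvDfsVisit]
    refine ⟨hd, ?_⟩
    intro G v ns
    induction ns generalizing v with
    | nil => simp [pvNeighLoop]
    | cons x xs ih =>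
      rw [pvNeighLoop]
      split
      · exact le_trans (ih _) (hd _ _ _)
      · exact ih v
  | succ f ihf =>
    have hd : ∀ G v (i : Int), (pvDfsVisit G (f+1) v i).count false ≤ v.count false := by
      intro G v i
      rw [pvDfsVisit]
      split
      · next hg => exact le_trans (ihf.2 _ _ _) (le_of_lt (pvCount_pySetD_lt v i hg))
      · exact le_refl _
    refine ⟨hd, ?_⟩
    intro G v ns
    induction ns generalizing v with
    | nil => simp [pvNeighLoop]
    | cons x xs ih =>
      rw [pvNeighLoop]
      split
      · exact le_trans (ih _) (hd _ _ _)
      · exact ih v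

-- BISIMULATION: running the explicit stack is running A's neighbour loop
theorem pvBisim (fuel : Nat) :
    ∀ (ns rest : List Int) (G : List (List Int)) (v : List Bool),
      v.count false ≤ fuel →
      pvStackLoop G v (ns ++ rest) = pvStackLoop G (pvNeighLoop G fuel v ns) rest := by
  induction fuel with
  | zero =>
    intro ns
    induction ns with
    | nil => intro rest G v _; simp [pvNeighLoop]
    | cons x xs ih =>
      intro rest G v hc
      have hg : ¬ PySem.List.pyGet? v x = some false := by
        intro hg
        have hm : false ∈ v := PySem.List.mem_of_pyGet?_eq_some (h := hg)
        have := List.count_pos_iff.mpr hm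
        omega
      rw [List.cons_append, pvStackLoop, dif_neg hg, pvNeighLoop, if_neg hg]
      exact ih rest G v hc
  | succ f ihf =>
    intro ns
    induction ns with
    | nil => intro rest G v _; simp [pvNeighLoop]
    | cons x xs ih =>
      intro rest G v hc
      rw [List.cons_append, pvStackLoop, pvNeighLoop]
      by_cases hg : PySem.List.pyGet? v x = some false
      · rw [dif_pos hg, if_pos hg]
        have hc1 : (PySem.List.pySetD v x true).count false ≤ f := by
          have := pvCount_pySetD_lt v x hg; omega
        rw [ihf (PySem.List.pyGetD G x []) (xs ++ rest) G _ hc1]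
        have hdfs : pvNeighLoop G f (PySem.List.pySetD v x true) (PySem.List.pyGetD G x []) =
            pvDfsVisit G (f+1) v x := by
          rw [pvDfsVisit, if_pos hg]
        rw [hdfs]
        have hc2 : (pvDfsVisit G (f+1) v x).count false ≤ f + 1 :=
          le_trans ((pvCountBoth (f+1)).1 G v x) hc
        exact ih rest G _ hc2
      · rw [dif_neg hg, if_neg hg]
        exact ih rest G v hc

-- integrity_check's counting loop: the count never drops …
theorem pvCnt_ge (G : List (List Int)) (n : Nat) :
    ∀ (is : List Nat) (st : List Bool × Int), st.2 ≤ (is.foldl (pvCntStep G n) st).2 := by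
  intro is
  induction is with
  | nil => intro st; simp
  | cons x xs ih =>
    intro st
    rw [List.foldl_cons]
    refine le_trans ?_ (ih _)
    unfold pvCntStep
    split
    · simp
    · exact le_refl _

-- … it stays put when every remaining vertex is already visited …
theorem pvCnt_skip (G : List (List Int)) (n : Nat) :
    ∀ (is : List Nat) (st : List Bool × Int),
      (∀ i ∈ is, PySem.List.pyGet? st.1 (i : Int) = some true) →
      is.foldl (pvCntStep G n) st = st := by
  intro is
  induction is with
  | nil => intro st _; rfl
  | cons x xs ih =>
    intro st h
    rw [List.foldl_cons]
    have hx : pvCntStep G n st x = st := by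
      unfold pvCntStep
      rw [if_neg (by rw [h x (List.mem_cons_self)]; simp)]
    rw [hx]
    exact ih st (fun i hi => h i (List.mem_cons_of_mem _ hi))

-- … and it gains at least one when some remaining vertex is unvisited
theorem pvCnt_two (G : List (List Int)) (n : Nat) :
    ∀ (is : List Nat) (st : List Bool × Int) (i0 : Nat), i0 ∈ is →
      PySem.List.pyGet? st.1 (i0 : Int) = some false →
      st.2 + 1 ≤ (is.foldl (pvCntStep G n) st).2 := by
  intro is
  induction is with
  | nil => intro st i0 hm; simp at hm
  | cons x xs ih =>
    intro st i0 hm h0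
    rw [List.foldl_cons]
    by_cases hx : PySem.List.pyGet? st.1 (x : Int) = some false
    · have hstep : pvCntStep G n st x = (pvDfsVisit G n st.1 (x : Int), st.2 + 1) := by
        unfold pvCntStep; rw [if_pos hx]
      rw [hstep]
      have := pvCnt_ge G n xs (pvDfsVisit G n st.1 (x : Int), st.2 + 1)
      simpa using this
    · have hstep : pvCntStep G n st x = st := by unfold pvCntStep; rw [if_neg hx]
      rw [hstep]
      rcases List.mem_cons.mp hm with rfl | hmem
      · exact absurd h0 hx
      · exact ih st i0 hmem h0

-- CONNECTIVITY: A's component count is ≤ 1 exactly when B's stack DFS from 0 marks everything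
theorem pvConn_eq (G : List (List Int)) :
    pvIntegrity G =
      (if G.length = 0 then true
       else (pvStackLoop G (List.replicate G.length false) [(0 : Int)]).all (fun b => b)) := by
  cases hn : G.length with
  | zero => simp [pvIntegrity, hn]
  | succ m =>
    rw [if_neg (by omega)]
    unfold pvIntegrity
    rw [hn]
    have h00 : PySem.List.pyGet? (List.replicate (m+1) false) ((0 : Nat) : Int) = some false := by
      rw [Nat.cast_zero, PySem.List.pyGet?_zero]
      simp
    have hc0 : (List.replicate (m+1) false).count false ≤ m + 1 := by
      simp
    have hstack : pvStackLoop G (List.replicate (m+1) false) [(0 : Int)]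
        = pvDfsVisit G (m+1) (List.replicate (m+1) false) (0 : Int) := by
      have h := pvBisim (m+1) [(0 : Int)] [] G (List.replicate (m+1) false) hc0
      rw [List.append_nil] at h
      rw [h, pvStackLoop, pvNeighLoop, if_pos (by simp only [Nat.cast_zero] at h00; exact h00), pvNeighLoop]
    have hlen1 : (pvDfsVisit G (m+1) (List.replicate (m+1) false) (0 : Int)).length = m + 1 := by
      rw [(pvLenBoth (m+1)).1]; simp
    have h0t : (pvDfsVisit G (m+1) (List.replicate (m+1) false) (0 : Int))[0]? = some true := by
      rw [pvDfsVisit, if_pos (by simp only [Nat.cast_zero] at h00; exact h00)]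
      apply (pvMonoBoth m).2
      have hidx : PySem.List.pyIdx? (List.replicate (m+1) false).length (0 : Int) = some 0 := by
        simp [PySem.List.pyIdx?]
      rw [pvSetD_norm _ _ _ 0 hidx, List.getElem?_set]
      simp
    rw [List.range_succ_eq_map, List.foldl_cons]
    have hfirst : pvCntStep G (m+1) (List.replicate (m+1) false, 0) 0
        = (pvDfsVisit G (m+1) (List.replicate (m+1) false) (0 : Int), 1) := by
      unfold pvCntStep
      rw [if_pos h00]
      simp
    rw [hfirst, hstack]
    generalize hv1 : pvDfsVisit G (m+1) (List.replicate (m+1) false) (0 : Int) = v1 at *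
    cases hall : v1.all (fun b => b) with
    | true =>
      have hall' : ∀ i ∈ (List.range m).map Nat.succ, PySem.List.pyGet? v1 (i : Int) = some true := by
        intro i hi
        obtain ⟨j, hj, rfl⟩ := List.mem_map.mp hi
        have hjm : j < m := List.mem_range.mp hj
        rw [PySem.List.pyGet?_natCast]
        have hlt : j.succ < v1.length := by omega
        rw [List.getElem?_eq_getElem hlt]
        have := List.all_eq_true.mp hall _ (List.getElem_mem hlt)
        simpa using this
      rw [pvCnt_skip G (m+1) _ _ hall']
      simp
    | false =>
      have hex : ∃ x ∈ v1, x = false := by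
        have := List.all_eq_false.mp hall
        simpa using this
      obtain ⟨b, hbmem, hb⟩ := hex
      subst hb
      obtain ⟨k, hk, hkb⟩ := List.mem_iff_getElem.mp hbmem
      have hkm : k < m + 1 := by omega
      cases k with
      | zero =>
        rw [List.getElem?_eq_getElem hk] at h0t
        rw [hkb] at h0t
        simp at h0t
      | succ j =>
        have hjm : j < m := by
          have := hlen1; omega
        have hmem : j + 1 ∈ (List.range m).map Nat.succ :=
          List.mem_map.mpr ⟨j, List.mem_range.mpr hjm, rfl⟩
        have hfalse : PySem.List.pyGet? v1 ((j + 1 : Nat) : Int) = some false := by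
          rw [PySem.List.pyGet?_natCast, List.getElem?_eq_getElem hk, hkb]
        have h2 := pvCnt_two G (m+1) ((List.range m).map Nat.succ) (v1, (1 : Int)) (j+1) hmem hfalse
        apply decide_eq_false
        simp only at h2
        omega

theorem pvFoldlLenPres {α β : Type} (f : List β → α → List β) (h : ∀ g x, (f g x).length = g.length) :
    ∀ (l : List α) (g : List β), (l.foldl f g).length = g.length := by
  intro l
  induction l with
  | nil => intro g; rfl
  | cons x xs ih => intro g; rw [List.foldl_cons, ih, h]

theorem pvBuildAdj_length (matrix : List (List Int)) : (pvBuildAdj matrix).length = matrix.length := by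
  unfold pvBuildAdj
  rw [pvFoldlLenPres _ ?hpres, List.length_replicate]
  case hpres =>
    intro g i
    apply pvFoldlLenPres
    intro g' j
    split
    · simp [pvApp]
    · rfl

theorem pvFoldRangeGetD {α β : Type} (l : List α) (d : α) (g : β → α → β) :
    ∀ b, (List.range l.length).foldl (fun acc i => g acc (l.getD i d)) b = l.foldl g b := by
  induction l with
  | nil => intro b; rfl
  | cons a t ih =>
    intro b
    rw [List.length_cons, List.range_succ_eq_map, List.foldl_cons, List.foldl_map]
    simp only [List.getD_cons_zero, List.getD_cons_succ]
    exact ih (g b a)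

theorem pvFlagFold :
    ∀ (l : List (List Int)) (b : Bool),
      l.foldl (fun acc row => if PySem.Int.mod (PySem.List.len row) 2 ≠ 0 then false else acc) b
        = (b && l.all (fun row => row.length % 2 == 0)) := by
  intro l
  induction l with
  | nil => intro b; simp
  | cons r t ih =>
    intro b
    rw [List.foldl_cons, List.all_cons, ih]
    have hmod : PySem.Int.mod (PySem.List.len r) 2 = (r.length : Int) % 2 := by
      rw [PySem.Int.mod_eq_emod_of_pos (by omega)]
      simp
    by_cases hp : PySem.Int.mod (PySem.List.len r) 2 ≠ 0
    · have hodd : (r.length % 2 == 0) = false := by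
        rw [hmod] at hp
        simp only [beq_eq_false_iff_ne, ne_eq]
        omega
      rw [if_pos hp, hodd]
      simp
    · have heven : (r.length % 2 == 0) = true := by
        rw [hmod] at hp
        simp only [beq_iff_eq]
        omega
      rw [if_neg hp, heven]
      simp

theorem main_eq (matrix : List (List Int)) : matrix_to_adj matrix = matrix_to_adj_alt matrix := by
  unfold matrix_to_adj matrix_to_adj_alt
  refine Prod.ext rfl ?_
  show ((List.range matrix.length).foldl
      (fun can_do i => if PySem.Int.mod (PySem.List.len ((pvBuildAdj matrix).getD i [])) 2 ≠ 0 then false else can_do)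
      true && pvIntegrity (pvBuildAdj matrix)) = _
  rw [← pvBuildAdj_length matrix]
  rw [pvFoldRangeGetD (pvBuildAdj matrix) ([] : List Int)
      (fun acc row => if PySem.Int.mod (PySem.List.len row) 2 ≠ 0 then false else acc) true]
  rw [pvFlagFold, pvConn_eq]
  simp

-- ===== VERDICT (by name: the statement is the Claim_ definition above) =====
theorem matrix_to_adj_spec : Claim_equal_matrix_to_adj := by
  intro matrix _ _
  unfold Spec_matrix_to_adj
  exact main_eq matrix
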